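-- pv_equiv track=rewrite | github.com/enrique-torres/AIHardwareAnalyticalModel | inference_analytical_model_v1.py | get_closest_datatype
-- ===== SOURCE A (Python) =====
-- def get_closest_datatype(bitlength, datatypes):
--     closest_type = None
--     smallest_diff = float('inf')
--     for dtype, specs in datatypes.items():
--         diff = specs['bitlength'] - bitlength
--         if 0 <= diff < smallest_diff:
--             smallest_diff = diff
--             closest_type = dtype
--     return closest_type
-- ===== SOURCE B (Python) =====
-- def get_closest_datatype(bitlength, datatypes):
--     for dtype, specs in sorted(datatypes.items(), key=lambda kv: kv[1]['bitlength']):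
--         if specs['bitlength'] >= bitlength:
--             return dtype
--     return None
-- ===== Notes on version B (the rewrite author's own statement) =====
-- stated objective: alternative
-- what changed: Replaced the running-minimum single scan over dict items with a stable sort by bitlength followed by a first-fit scan returning the first datatype whose bitlength reaches the target (stability preserves the insertion-order tie-break).
import Mathlib
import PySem

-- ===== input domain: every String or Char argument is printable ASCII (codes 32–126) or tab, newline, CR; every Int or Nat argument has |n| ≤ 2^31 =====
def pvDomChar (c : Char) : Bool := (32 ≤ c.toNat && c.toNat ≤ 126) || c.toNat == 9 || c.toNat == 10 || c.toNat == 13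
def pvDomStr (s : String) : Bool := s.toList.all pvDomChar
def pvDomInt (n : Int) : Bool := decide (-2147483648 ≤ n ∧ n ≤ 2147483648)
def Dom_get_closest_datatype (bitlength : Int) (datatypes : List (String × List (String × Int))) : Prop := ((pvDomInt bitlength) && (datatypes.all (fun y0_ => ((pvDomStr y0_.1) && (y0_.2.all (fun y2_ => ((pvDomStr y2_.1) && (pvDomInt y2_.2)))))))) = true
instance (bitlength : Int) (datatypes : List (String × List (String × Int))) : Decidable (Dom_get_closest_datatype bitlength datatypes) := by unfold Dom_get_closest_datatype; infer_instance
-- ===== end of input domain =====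

-- B replaces A's running-minimum scan by a stable sort on bitlength followed by a first-fit scan
-- (objective: alternative decomposition, same results; no speed claim).

-- shared helper: specs['bitlength'] under Python dict semantics (Pre_ guarantees the key is present)
def pvBL (kv : String × List (String × Int)) : Int := (PySem.Dict.ofList kv.2).getD "bitlength" 0

-- ===== PORT A =====
def get_closest_datatype (bitlength : Int) (datatypes : List (String × List (String × Int))) : Option String :=
  ((PySem.Dict.ofList datatypes).items.foldl
    (fun (st : Option String × Option Int) kv =>
      let diff := pvBL kv - bitlength
      if decide (0 ≤ diff) && st.2.all (fun s => decide (diff < s)) then (some kv.1, some diff) else st)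
    (none, none)).1

-- ===== PORT B =====
def get_closest_datatype_alt (bitlength : Int) (datatypes : List (String × List (String × Int))) : Option String :=
  ((PySem.List.sorted (PySem.Dict.ofList datatypes).items (fun kv => pvBL kv) false).find?
    (fun kv => decide (bitlength ≤ pvBL kv))).map (·.1)

-- ===== PRECONDITION & SPEC =====
-- Pre_ excludes exactly the inputs where Python A raises KeyError: a datatype whose specs dict has no 'bitlength' key.
def Pre_get_closest_datatype (bitlength : Int) (datatypes : List (String × List (String × Int))) : Prop :=
  ∀ kv ∈ (PySem.Dict.ofList datatypes).items, (PySem.Dict.ofList kv.2).contains "bitlength" = true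
instance (bitlength : Int) (datatypes : List (String × List (String × Int))) : Decidable (Pre_get_closest_datatype bitlength datatypes) := by unfold Pre_get_closest_datatype; infer_instance

def pvWitness_get_closest_datatype : Int × (List (String × List (String × Int))) :=
  (8, [("int8", [("bitlength", 8)]), ("int16", [("bitlength", 16)])])

def Spec_get_closest_datatype (bitlength : Int) (datatypes : List (String × List (String × Int))) (out : Option String) : Prop := out = get_closest_datatype_alt bitlength datatypes
instance (bitlength : Int) (datatypes : List (String × List (String × Int))) (out : Option String) : Decidable (Spec_get_closest_datatype bitlength datatypes out) := by unfold Spec_get_closest_datatype; infer_instance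

-- ===== CLAIM (what is proved, stated in full; the proofs are below) =====
def Claim_equal_get_closest_datatype : Prop := ∀ (bitlength : Int) (datatypes : List (String × List (String × Int))), Dom_get_closest_datatype bitlength datatypes → Pre_get_closest_datatype bitlength datatypes → Spec_get_closest_datatype bitlength datatypes (get_closest_datatype bitlength datatypes)

-- ===== LEMMAS AND PROOFS =====

-- the one-element improvement step both programs implement: keep the first qualifying
-- element of strictly smallest key seen so far
def pvBest {α : Type} (t : Int) (f : α → Int) (acc : Option α) (x : α) : Option α :=
  if decide (t ≤ f x) && acc.all (fun m => decide (f x < f m)) then some x else acc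

-- inserting x into a key-sorted list commutes with "first qualifying element" via pvBest
lemma pv_find?_insertBy {α : Type} (t : Int) (f : α → Int) (x : α) (s : List α)
    (hs : s.Pairwise (fun a b => f a ≤ f b)) :
    (PySem.List.insertBy (fun a b => decide (f a < f b)) x s).find? (fun y => decide (t ≤ f y))
      = pvBest t f (s.find? (fun y => decide (t ≤ f y))) x := by
  induction s with
  | nil =>
    by_cases h : t ≤ f x <;> simp [PySem.List.insertBy, pvBest, h, List.find?]
  | cons y s ih =>
    rw [List.pairwise_cons] at hs
    by_cases hxy : f x < f y
    · -- x goes in front of y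
      have hins : PySem.List.insertBy (fun a b => decide (f a < f b)) x (y :: s) = x :: y :: s := by
        simp [PySem.List.insertBy, hxy]
      rw [hins]
      by_cases hqy : t ≤ f y
      · -- find? (y::s) = some y
        by_cases hqx : t ≤ f x <;>
          simp [List.find?, pvBest, hqx, hqy, hxy]
      · -- y not qualifying
        have hfind : (y :: s).find? (fun z => decide (t ≤ f z)) = s.find? (fun z => decide (t ≤ f z)) := by
          simp [List.find?, hqy]
        rw [hfind]
        by_cases hqx : t ≤ f x
        · -- all qualifying elements of s have f x < f them (f x < f y ≤ f m)
          have hall : (s.find? (fun z => decide (t ≤ f z))).all (fun m => decide (f x < f m)) = true := by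
            cases hf : s.find? (fun z => decide (t ≤ f z)) with
            | none => rfl
            | some m =>
              have hm : m ∈ s := List.mem_of_find?_eq_some hf
              have : f y ≤ f m := hs.1 m hm
              simp [show f x < f m by omega]
          simp [List.find?, pvBest, hqx, hall]
        · simp [List.find?, pvBest, hqx, hqy]
    · -- x goes after y
      have hins : PySem.List.insertBy (fun a b => decide (f a < f b)) x (y :: s)
          = y :: PySem.List.insertBy (fun a b => decide (f a < f b)) x s := by
        simp [PySem.List.insertBy, hxy]
      rw [hins]
      by_cases hqy : t ≤ f y
      · -- find? both sides = some y; pvBest keeps some y since ¬ f x < f y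
        simp [List.find?, pvBest, hqy, hxy]
      · simp only [List.find?, show (decide (t ≤ f y)) = false by simp [hqy]]
        exact ih hs.2


-- first-fit on the sorted list = running minimum over the original list
lemma pv_find?_sorted {α : Type} (t : Int) (f : α → Int) (l : List α) :
    (PySem.List.sorted l f false).find? (fun y => decide (t ≤ f y)) = l.foldl (pvBest t f) none := by
  induction l using List.reverseRecOn with
  | nil => simp [PySem.List.sorted]
  | append_singleton l x ih =>
    rw [PySem.List.sorted_eq_foldl_insertBy] at *
    rw [List.foldl_append, List.foldl_append]
    simp only [List.foldl_cons, List.foldl_nil]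
    rw [pv_find?_insertBy t f x _ (by
      have := PySem.List.sorted_pairwise (xs := l) (key := f)
      rwa [PySem.List.sorted_eq_foldl_insertBy] at this), ih]


-- A's (closest_type, smallest_diff) pair is the projection of the pvBest fold
lemma pv_foldA {β γ : Type} (t : Int) (f : β × γ → Int) (l : List (β × γ)) (acc : Option (β × γ)) :
    l.foldl
      (fun (st : Option β × Option Int) kv =>
        let diff := f kv - t
        if decide (0 ≤ diff) && st.2.all (fun s => decide (diff < s)) then (some kv.1, some diff) else st)
      (acc.map (·.1), acc.map (fun kv => f kv - t))
    = ((l.foldl (pvBest t f) acc).map (·.1), (l.foldl (pvBest t f) acc).map (fun kv => f kv - t)) := by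
  induction l generalizing acc with
  | nil => rfl
  | cons x l ih =>
    have hstep : (fun (st : Option β × Option Int) kv =>
        let diff := f kv - t
        if decide (0 ≤ diff) && st.2.all (fun s => decide (diff < s)) then (some kv.1, some diff) else st)
        (acc.map (·.1), acc.map (fun kv => f kv - t)) x
        = ((pvBest t f acc x).map (·.1), (pvBest t f acc x).map (fun kv => f kv - t)) := by
      cases acc with
      | none =>
        simp only [pvBest, Option.map_none, Option.all_none, Bool.and_true]
        by_cases h : 0 ≤ f x - t
        · have h' : t ≤ f x := by omega
          simp [h']
        · have h' : ¬ t ≤ f x := by omega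
          simp [h']
      | some m =>
        simp only [pvBest, Option.map_some, Option.all_some]
        by_cases h : 0 ≤ f x - t ∧ f x - t < f m - t
        · have h1 : t ≤ f x := by omega
          have h2 : f x < f m := by omega
          simp [h.2, h1, h2]
        · rcases not_and_or.mp h with h' | h'
          · have h1 : ¬ t ≤ f x := by omega
            simp [h1]
          · have h2 : ¬ f x < f m := by omega
            by_cases h1 : t ≤ f x <;> simp [h', h1, h2]
    simp only [List.foldl_cons, hstep, ih]


-- ===== VERDICT (by name: the statement is the Claim_ definition above) =====
theorem get_closest_datatype_spec : Claim_equal_get_closest_datatype := by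
  intro bitlength datatypes _ _
  unfold Spec_get_closest_datatype get_closest_datatype get_closest_datatype_alt
  rw [pv_find?_sorted]
  have h := pv_foldA bitlength (fun kv => pvBL kv) (PySem.Dict.ofList datatypes).items (acc := none)
  simp only [Option.map_none] at h
  rw [h]
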